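-- pv_equiv track=rewrite | github.com/LiXuanqi/leetcode-solutions | python3/758.bold-words-in-string.py | bold_word
-- ===== SOURCE A (Python) =====
-- def bold_word(S, need_bold):
--     ans = ''
--     curr_bold_text = ''
--     for index, c in enumerate(S):
--         if need_bold[index]:
--             curr_bold_text += c
--         else:
--             if curr_bold_text != '':
--                 ans += (f'<b>{curr_bold_text}</b>')
--             curr_bold_text = ''
--             ans += c
--
--     if curr_bold_text != '':
--         ans += (f'<b>{curr_bold_text}</b>')
--     return ans
-- ===== SOURCE B (Python) =====
-- def bold_word(S, need_bold):
--     n = len(S)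
--     parts = []
--     for i, c in enumerate(S):
--         b = need_bold[i]
--         if b and (i == 0 or not need_bold[i - 1]):
--             parts.append('<b>')
--         parts.append(c)
--         if b and (i == n - 1 or not need_bold[i + 1]):
--             parts.append('</b>')
--     return ''.join(parts)
-- ===== Notes on version B (the rewrite author's own statement) =====
-- stated objective: alternative
-- what changed: Replaces A's run-buffer accumulation (building curr_bold_text and flushing it on run end) with per-position boundary detection: each character is emitted once, with '<b>' when a bold run starts at it and '</b>' when one ends at it, collected in a list and joined.
import Mathlib
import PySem

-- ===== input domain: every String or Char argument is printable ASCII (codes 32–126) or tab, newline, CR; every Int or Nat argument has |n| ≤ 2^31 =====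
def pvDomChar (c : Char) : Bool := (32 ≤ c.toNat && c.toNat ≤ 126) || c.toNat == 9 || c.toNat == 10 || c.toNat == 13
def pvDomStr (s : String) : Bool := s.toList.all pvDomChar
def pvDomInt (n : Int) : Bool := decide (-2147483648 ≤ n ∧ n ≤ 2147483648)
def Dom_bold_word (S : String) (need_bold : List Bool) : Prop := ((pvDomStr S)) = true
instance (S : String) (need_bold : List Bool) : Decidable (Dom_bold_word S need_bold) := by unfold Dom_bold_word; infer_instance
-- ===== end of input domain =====

-- B replaces A's run-buffer-and-flush accumulation by per-position run-boundary detection; same O(n) cost ("alternative").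

-- ===== PORT A =====
-- f'<b>{curr}</b>'
def boldFlush (curr : List Char) : List Char :=
  ['<', 'b', '>'] ++ curr ++ ['<', '/', 'b', '>']

-- the enumerate loop of A: state (ans, curr_bold_text); need_bold[index] read via getD
-- (inside Pre_ every accessed index is in range, so getD is exact there)
def boldA (nb : List Bool) : List Char → Nat → List Char → List Char → List Char
  | [], _, ans, curr => if curr ≠ [] then ans ++ boldFlush curr else ans
  | c :: rest, i, ans, curr =>
    if nb[i]?.getD false then
      boldA nb rest (i + 1) ans (curr ++ [c])
    else
      boldA nb rest (i + 1) ((if curr ≠ [] then ans ++ boldFlush curr else ans) ++ [c]) []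

def bold_word (S : String) (need_bold : List Bool) : String :=
  String.mk (boldA need_bold S.toList 0 [] [])

-- ===== PORT B =====
-- B's loop: for each position, emit '<b>' at a run start, the char, '</b>' at a run end
def boldB (nb : List Bool) (n : Nat) : List Char → Nat → List Char
  | [], _ => []
  | c :: rest, i =>
    (if nb[i]?.getD false && ((i == 0) || !nb[i - 1]?.getD false) then ['<', 'b', '>'] else [])
      ++ [c]
      ++ (if nb[i]?.getD false && ((i + 1 == n) || !nb[i + 1]?.getD false) then ['<', '/', 'b', '>'] else [])
      ++ boldB nb n rest (i + 1)

def bold_word_alt (S : String) (need_bold : List Bool) : String :=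
  String.mk (boldB need_bold S.toList.length S.toList 0)

-- ===== PRECONDITION & SPEC =====
-- A (and B) index need_bold[i] for every i < len(S): both raise IndexError when need_bold is shorter than S.
def Pre_bold_word (S : String) (need_bold : List Bool) : Prop :=
  S.toList.length ≤ need_bold.length
instance (S : String) (need_bold : List Bool) : Decidable (Pre_bold_word S need_bold) := by unfold Pre_bold_word; infer_instance

def pvWitness_bold_word : String × List Bool := ("abc", [true, false, true])

def Spec_bold_word (S : String) (need_bold : List Bool) (out : String) : Prop := out = bold_word_alt S need_bold
instance (S : String) (need_bold : List Bool) (out : String) : Decidable (Spec_bold_word S need_bold out) := by unfold Spec_bold_word; infer_instance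

-- ===== CLAIM (what is proved, stated in full; the proofs are below) =====
def Claim_equal_bold_word : Prop := ∀ (S : String) (need_bold : List Bool), Dom_bold_word S need_bold → Pre_bold_word S need_bold → Spec_bold_word S need_bold (bold_word S need_bold)

-- ===== LEMMAS AND PROOFS =====

-- A's accumulator only ever grows on the right
theorem boldA_acc (nb : List Bool) (rest : List Char) :
    ∀ (i : Nat) (ans curr : List Char),
      boldA nb rest i ans curr = ans ++ boldA nb rest i [] curr := by
  induction rest with
  | nil =>
    intro i ans curr
    by_cases h : curr = [] <;> simp [boldA, h]
  | cons c rest ih =>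
    intro i ans curr
    simp only [boldA]
    by_cases h : nb[i]?.getD false = true
    · rw [if_pos h, if_pos h, ih (i + 1) ans, ih (i + 1) []]
    · rw [if_neg h, if_neg h,
          ih (i + 1) ((if curr ≠ [] then ans ++ boldFlush curr else ans) ++ [c]),
          ih (i + 1) ((if curr ≠ [] then [] ++ boldFlush curr else []) ++ [c])]
      by_cases hc : curr = [] <;> simp [hc, List.append_assoc]

-- whether the pending run (if any) is closed by the next position
def pendClose (nb : List Bool) (rest : List Char) (i : Nat) : Bool :=
  match rest with
  | [] => true
  | _ :: _ => !nb[i]?.getD false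

-- the close-tag test B makes at position i+1 agrees with pendClose
theorem close_agree (nb : List Bool) (rest : List Char) (i n : Nat)
    (hn : n = i + 1 + rest.length) :
    ((i + 1 == n) || !nb[i + 1]?.getD false) = pendClose nb rest (i + 1) := by
  subst hn
  cases rest with
  | nil => simp [pendClose]
  | cons d r =>
    have h2 : (i + 1 == i + 1 + (d :: r).length) = false := by
      simp only [beq_eq_false_iff_ne, ne_eq, List.length_cons]; omega
    simp [pendClose, h2]

-- bridge: A from position i with pending run `curr` = the pending run's output plus B from position i
theorem boldA_eq_boldB (nb : List Bool) :
    ∀ (rest : List Char) (i : Nat) (curr : List Char) (n : Nat),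
      n = i + rest.length →
      (curr = [] ↔ (i = 0 ∨ nb[i - 1]?.getD false = false)) →
      boldA nb rest i [] curr =
        (if curr = [] then []
         else ['<', 'b', '>'] ++ curr ++ (if pendClose nb rest i then ['<', '/', 'b', '>'] else []))
          ++ boldB nb n rest i := by
  intro rest
  induction rest with
  | nil =>
    intro i curr n hn hinv
    by_cases hc : curr = [] <;> simp [boldA, boldB, boldFlush, pendClose, hc]
  | cons c rest ih =>
    intro i curr n hn hinv
    have hn' : n = (i + 1) + rest.length := by
      simp only [List.length_cons] at hn; omega
    have hcl := close_agree nb rest i n hn'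
    by_cases h : nb[i]?.getD false = true
    · -- bold position: A buffers c, B emits it (open tag iff run starts here)
      have hinv' : curr ++ [c] = [] ↔ (i + 1 = 0 ∨ nb[i + 1 - 1]?.getD false = false) := by
        simp [h]
      have hrec := ih (i + 1) (curr ++ [c]) n hn' hinv'
      have hA : boldA nb (c :: rest) i [] curr = boldA nb rest (i + 1) [] (curr ++ [c]) := by
        simp [boldA, h]
      rw [hA, hrec]
      simp only [boldB]
      rw [h, hcl]
      by_cases hc : curr = []
      · have hopen : ((i == 0) || !nb[i - 1]?.getD false) = true := by
          rcases hinv.mp hc with h0 | h1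
          · simp [h0]
          · simp [h1]
        rw [hopen]
        simp [hc]
      · have hx : ¬ (i = 0 ∨ nb[i - 1]?.getD false = false) := fun hx => hc (hinv.mpr hx)
        push_neg at hx
        have hopen : ((i == 0) || !nb[i - 1]?.getD false) = false := by
          simp [beq_eq_false_iff_ne.mpr hx.1, hx.2]
        rw [hopen]
        simp [hc, pendClose, h, List.append_assoc]
    · -- non-bold position: A flushes the run and emits c, B emits c with no tags
      have hb : nb[i]?.getD false = false := by simpa using h
      have hinv' : ([] : List Char) = [] ↔ (i + 1 = 0 ∨ nb[i + 1 - 1]?.getD false = false) := by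
        simp [hb]
      have hrec := ih (i + 1) [] n hn' hinv'
      have hA : boldA nb (c :: rest) i [] curr =
          boldA nb rest (i + 1) ((if curr ≠ [] then [] ++ boldFlush curr else []) ++ [c]) [] := by
        simp [boldA, hb]
      rw [hA, boldA_acc, hrec]
      simp only [boldB]
      rw [hb]
      by_cases hc : curr = [] <;>
        simp [hc, pendClose, hb, boldFlush, List.append_assoc]

-- ===== VERDICT (by name: the statement is the Claim_ definition above) =====
theorem bold_word_spec : Claim_equal_bold_word := by
  intro S nb _ _
  unfold Spec_bold_word bold_word bold_word_alt
  rw [boldA_eq_boldB nb S.toList 0 [] S.toList.length (by simp) (by simp)]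
  simp
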